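-- pv_equiv track=rewrite | github.com/reevesba/protego | protego/utils/feature_extractor.py | __get_num_keywords
-- ===== SOURCE A (Python) =====
-- def __get_num_keywords(payload: str) -> int:
--     """ Get SQL keyword count from payload
--         Parameters
--         ----------
--         self: FeatureExtractor instance
--         payload: Single sample
--
--         Returns
--         -------
--         Number of SQL keywords
--     """
--     keywords = ['select',
--                 'from',
--                 'where',
--                 'union',
--                 'sleep',
--                 'or',
--                 'and',
--                 'like',
--                 'order']
--     count = 0
--
--     word_list = payload.split()
--     for word in word_list:
--         if word.lower() in keywords:
--             count += 1
--
--     return count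
-- ===== SOURCE B (Python) =====
-- import collections
--
-- def __get_num_keywords(payload: str) -> int:
--     keywords = ['select', 'from', 'where', 'union', 'sleep',
--                 'or', 'and', 'like', 'order']
--     counts = collections.Counter(w.lower() for w in payload.split())
--     return sum(counts[kw] for kw in keywords)
-- ===== Notes on version B (the rewrite author's own statement) =====
-- stated objective: alternative
-- what changed: B builds a frequency table (Counter) of all lowercased words in one pass and then sums the tallies of the nine keywords, inverting A's traversal (A scans every word against the keyword list).
import Mathlib
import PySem

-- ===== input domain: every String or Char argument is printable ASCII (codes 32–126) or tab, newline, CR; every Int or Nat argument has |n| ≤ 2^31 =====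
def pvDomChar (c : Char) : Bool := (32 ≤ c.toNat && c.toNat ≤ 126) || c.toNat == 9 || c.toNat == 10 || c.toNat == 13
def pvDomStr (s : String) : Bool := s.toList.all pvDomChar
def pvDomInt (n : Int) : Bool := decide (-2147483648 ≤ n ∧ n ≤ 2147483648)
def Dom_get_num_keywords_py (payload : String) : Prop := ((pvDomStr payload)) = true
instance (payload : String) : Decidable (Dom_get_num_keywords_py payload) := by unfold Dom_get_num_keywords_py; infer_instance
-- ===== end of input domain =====

-- B builds a frequency table of the lowercased words once and then sums the nine keyword tallies
-- (inverted traversal); A scans every word against the keyword list.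

-- ===== PORT A =====
def pvKeywords : List String :=
  ["select", "from", "where", "union", "sleep", "or", "and", "like", "order"]

def get_num_keywords_py (payload : String) : Int :=
  let keywords := pvKeywords
  let word_list := PySem.Str.split₀ payload
  word_list.foldl (fun count word =>
    if PySem.Str.lower word ∈ keywords then count + 1 else count) 0

-- ===== PORT B =====
def get_num_keywords_py_alt (payload : String) : Int :=
  let keywords := pvKeywords
  let counts := PySem.Dict.counter ((PySem.Str.split₀ payload).map PySem.Str.lower)
  (keywords.map (fun kw => counts.getD kw 0)).sum

-- ===== PRECONDITION & SPEC =====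
def Spec_get_num_keywords_py (payload : String) (out : Int) : Prop := out = get_num_keywords_py_alt payload
instance (payload : String) (out : Int) : Decidable (Spec_get_num_keywords_py payload out) := by unfold Spec_get_num_keywords_py; infer_instance

-- ===== CLAIM (what is proved, stated in full; the proofs are below) =====
def Claim_equal_get_num_keywords_py : Prop := ∀ (payload : String), Dom_get_num_keywords_py payload → Spec_get_num_keywords_py payload (get_num_keywords_py payload)

-- ===== LEMMAS AND PROOFS =====

-- counting words lying in a duplicate-free key list = summing per-key tallies
theorem pv_countP_mem_cons (k : String) (ks : List String) (hkn : k ∉ ks) (ls : List String) :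
    ls.countP (fun w => decide (w ∈ k :: ks))
      = List.count k ls + ls.countP (fun w => decide (w ∈ ks)) := by
  induction ls with
  | nil => simp
  | cons w ws ihw =>
    rw [List.countP_cons, List.countP_cons, List.count_cons, ihw]
    by_cases hw : w = k
    · subst hw
      simp [hkn]
      omega
    · simp [hw, List.mem_cons]
      omega

theorem pv_sum_count_eq_countP (ls : List String) (ks : List String) (hk : ks.Nodup) :
    (ks.map (fun kw => (List.count kw ls : Int))).sum
      = (ls.countP (fun w => decide (w ∈ ks)) : Int) := by
  induction ks with
  | nil => simp
  | cons k ks ih =>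
    rcases List.nodup_cons.mp hk with ⟨hkn, hnd⟩
    rw [List.map_cons, List.sum_cons, ih hnd, pv_countP_mem_cons k ks hkn ls]
    push_cast
    ring

theorem get_num_keywords_eq (payload : String) :
    get_num_keywords_py payload = get_num_keywords_py_alt payload := by
  unfold get_num_keywords_py get_num_keywords_py_alt
  simp only [PySem.Dict.getD_counter]
  have hb : (fun (count : Int) word => if PySem.Str.lower word ∈ pvKeywords then count + 1 else count)
      = (fun (count : Int) word => if (fun w => decide (PySem.Str.lower w ∈ pvKeywords)) word = true then count + 1 else count) := by
    funext c w; simp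
  rw [hb, PySem.List.foldl_count_if]
  rw [pv_sum_count_eq_countP _ _ (by decide)]
  rw [List.countP_map]
  simp [Function.comp_def]

-- ===== VERDICT (by name: the statement is the Claim_ definition above) =====
theorem get_num_keywords_py_spec : Claim_equal_get_num_keywords_py := by
  intro payload _
  exact get_num_keywords_eq payload
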